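-- pv_equiv track=rewrite | github.com/Andrew-Mereuta/networking | temporal_network.py | calculate_degree
-- ===== SOURCE A (Python) =====
-- def calculate_degree(edges, nodes):
--     degrees = {node: 0 for node in nodes}
--     used_edges = set()
--     for (n1, n2) in edges:
--         if not ((n1, n2) in used_edges or (n2, n1) in used_edges):
--             degrees[n1] += 1
--             degrees[n2] += 1
--             used_edges.add((n1, n2))
--             used_edges.add((n2, n1))
--     sorted_grouped = {}
--     degrees = dict(sorted(degrees.items(), key=lambda item: item[1], reverse=True))
--     for key, val in sorted(degrees.items()):
--         if val in sorted_grouped: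
--             sorted_grouped[val].append(key)
--         else:
--             sorted_grouped[val] = [key]
--     return dict(sorted(sorted_grouped.items(), key=lambda x: x[0], reverse=True))
-- ===== SOURCE B (Python) =====
-- def calculate_degree(edges, nodes):
--     degrees = {node: 0 for node in nodes}
--     seen = set()
--     for n1, n2 in edges:
--         key = (n1, n2) if n1 <= n2 else (n2, n1)
--         if key not in seen:
--             seen.add(key)
--             degrees[n1] += 1
--             degrees[n2] += 1
--     return {d: sorted(n for n, v in degrees.items() if v == d)
--             for d in sorted(set(degrees.values()), reverse=True)}
-- ===== Notes on version B (the rewrite author's own statement) =====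
-- stated objective: simpler
-- what changed: Dedup keeps one canonical (min,max) key per undirected edge instead of inserting both orientations, and the three-step build-dict/re-sort/re-group grouping is replaced by a single comprehension: for each distinct degree in descending order, the sorted list of nodes having that degree.
import Mathlib
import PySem

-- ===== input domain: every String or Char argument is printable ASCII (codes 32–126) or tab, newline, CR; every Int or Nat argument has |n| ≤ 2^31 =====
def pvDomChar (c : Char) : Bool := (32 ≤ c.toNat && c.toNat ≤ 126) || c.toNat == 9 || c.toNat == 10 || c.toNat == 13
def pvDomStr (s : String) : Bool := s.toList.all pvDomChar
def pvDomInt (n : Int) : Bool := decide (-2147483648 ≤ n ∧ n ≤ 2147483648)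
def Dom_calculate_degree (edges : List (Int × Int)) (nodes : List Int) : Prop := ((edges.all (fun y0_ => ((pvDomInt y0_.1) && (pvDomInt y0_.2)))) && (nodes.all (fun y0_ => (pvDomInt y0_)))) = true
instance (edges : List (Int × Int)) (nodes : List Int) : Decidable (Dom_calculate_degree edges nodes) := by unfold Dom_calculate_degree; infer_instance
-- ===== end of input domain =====

-- B keeps A's counting loop but dedups via one canonical (min,max) key and replaces the
-- build-dict/re-sort/re-group phase by a per-degree comprehension (objective: simpler).


-- ===== PORT A =====
-- degrees = {node: 0 for node in nodes}   (shared literally by both Pythons)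
def degInit (nodes : List Int) : PySem.Dict Int Int :=
  nodes.foldl (fun d node => d.insert node 0) PySem.Dict.empty

-- loop body of A's edge loop; state = (degrees, used_edges).
-- degrees[n] += 1 is ported as modify with default 0: exact whenever n is a key
-- (Pre_ guarantees it; Python raises KeyError otherwise).
def stepA (st : PySem.Dict Int Int × PySem.Set (Int × Int)) (e : Int × Int) :
    PySem.Dict Int Int × PySem.Set (Int × Int) :=
  if !(st.2.contains (e.1, e.2) || st.2.contains (e.2, e.1)) then
    ((st.1.modify e.1 0 (· + 1)).modify e.2 0 (· + 1),
     (st.2.add (e.1, e.2)).add (e.2, e.1))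
  else st

-- loop body of the grouping loop: if val in sorted_grouped: append else start a list
def groupStep (g : PySem.Dict Int (List Int)) (kv : Int × Int) : PySem.Dict Int (List Int) :=
  if g.contains kv.2 then g.modify kv.2 [] (fun l => l ++ [kv.1]) else g.insert kv.2 [kv.1]

-- after the edge loop: degrees = dict(sorted(items, key=item[1], reverse=True)),
-- then the grouping loop over sorted(degrees.items()) (tuple comparison → sorted2),
-- then dict(sorted(grouped.items(), key=x[0], reverse=True))
def calculate_degree (edges : List (Int × Int)) (nodes : List Int) : List (Int × List Int) :=
  (PySem.Dict.ofList (PySem.List.sorted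
      ((PySem.List.sorted2
          (PySem.Dict.ofList (PySem.List.sorted
              (edges.foldl stepA (degInit nodes, PySem.Set.empty)).1.items (fun p => p.2) true)).items
          (fun p => p.1) (fun p => p.2)).foldl groupStep PySem.Dict.empty).items
      (fun p => p.1) true)).items

-- ===== PORT B =====
-- loop body of B's edge loop: canonical (min,max) key per undirected edge
def stepB (st : PySem.Dict Int Int × PySem.Set (Int × Int)) (e : Int × Int) :
    PySem.Dict Int Int × PySem.Set (Int × Int) :=
  let key := if e.1 ≤ e.2 then (e.1, e.2) else (e.2, e.1)
  if st.2.contains key then st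
  else ((st.1.modify e.1 0 (· + 1)).modify e.2 0 (· + 1), st.2.add key)

def calculate_degree_alt (edges : List (Int × Int)) (nodes : List Int) : List (Int × List Int) :=
  -- {d: sorted(n for n, v in degrees.items() if v == d) for d in sorted(set(degrees.values()), reverse=True)}
  (PySem.List.sorted (PySem.Set.ofList (edges.foldl stepB (degInit nodes, PySem.Set.empty)).1.values)
      (fun x => x) true).map
    (fun d => (d, PySem.List.sorted
        (((edges.foldl stepB (degInit nodes, PySem.Set.empty)).1.items.filter
            (fun p => p.2 == d)).map (fun p => p.1)) (fun x => x) false))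

-- ===== PRECONDITION & SPEC =====
-- Pre_ excludes inputs with an edge endpoint not among the nodes: there Python A (and B)
-- raises KeyError on degrees[n] += 1.
def Pre_calculate_degree (edges : List (Int × Int)) (nodes : List Int) : Prop :=
  ∀ e ∈ edges, e.1 ∈ nodes ∧ e.2 ∈ nodes
instance (edges : List (Int × Int)) (nodes : List Int) : Decidable (Pre_calculate_degree edges nodes) := by unfold Pre_calculate_degree; infer_instance

def pvWitness_calculate_degree : (List (Int × Int)) × List Int := ([(1, 2), (2, 1), (2, 3), (3, 3)], [1, 2, 3, 4])

def Spec_calculate_degree (edges : List (Int × Int)) (nodes : List Int) (out : List (Int × List Int)) : Prop := out = calculate_degree_alt edges nodes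
instance (edges : List (Int × Int)) (nodes : List Int) (out : List (Int × List Int)) : Decidable (Spec_calculate_degree edges nodes out) := by unfold Spec_calculate_degree; infer_instance

-- ===== CLAIM (what is proved, stated in full; the proofs are below) =====
def Claim_equal_calculate_degree : Prop := ∀ (edges : List (Int × Int)) (nodes : List Int), Dom_calculate_degree edges nodes → Pre_calculate_degree edges nodes → Spec_calculate_degree edges nodes (calculate_degree edges nodes)

-- ===== LEMMAS AND PROOFS =====

def canon (p : Int × Int) : Int × Int := if p.1 ≤ p.2 then p else (p.2, p.1)
theorem canon_eq_pair (p : Int × Int) (a b : Int) :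
    canon p = canon (a, b) ↔ p = (a, b) ∨ p = (b, a) := by
  rcases p with ⟨x, y⟩
  unfold canon
  simp only [Prod.mk.injEq]
  split_ifs <;> simp_all [Prod.ext_iff] <;> omega
theorem canon_swap (a b : Int) : canon (b, a) = canon (a, b) := by
  unfold canon; simp only; split_ifs <;> simp_all [Prod.ext_iff] <;> omega


theorem phase1_eq (es : List (Int × Int)) (d : PySem.Dict Int Int)
    (sA sB : PySem.Set (Int × Int)) (h : ∀ p, p ∈ sA ↔ canon p ∈ sB) :
    (es.foldl stepA (d, sA)).1 = (es.foldl stepB (d, sB)).1 := by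
  induction es generalizing d sA sB with
  | nil => rfl
  | cons e es ih =>
    rcases e with ⟨a, b⟩
    simp only [List.foldl_cons]
    have hkey : (if a ≤ b then (a, b) else (b, a)) = canon (a, b) := by
      unfold canon; rfl
    have hcond : (sA.contains (a, b) || sA.contains (b, a)) = sB.contains (canon (a, b)) := by
      rw [Bool.eq_iff_iff]
      simp only [Bool.or_eq_true, PySem.Set.contains_iff]
      rw [h (a, b), h (b, a), canon_swap]
      tauto
    by_cases hm : sB.contains (canon (a, b)) = true
    · have h1 : stepA (d, sA) (a, b) = (d, sA) := by
        simp only [stepA, hcond, hm, Bool.not_true]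
        simp
      have h2 : stepB (d, sB) (a, b) = (d, sB) := by
        simp only [stepB, hkey, hm]
        simp
      rw [h1, h2]
      exact ih d sA sB h
    · have hm' : sB.contains (canon (a, b)) = false := Bool.eq_false_iff.mpr hm
      have h1 : stepA (d, sA) (a, b)
          = ((d.modify a 0 (· + 1)).modify b 0 (· + 1), (sA.add (a, b)).add (b, a)) := by
        simp only [stepA, hcond, hm', Bool.not_false]
        simp
      have h2 : stepB (d, sB) (a, b)
          = ((d.modify a 0 (· + 1)).modify b 0 (· + 1), sB.add (canon (a, b))) := by
        simp only [stepB, hkey, hm']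
        simp
      rw [h1, h2]
      apply ih
      intro p
      rw [PySem.Set.mem_add, PySem.Set.mem_add, PySem.Set.mem_add]
      rw [h p, canon_eq_pair]
      tauto

theorem phase1_nodup (es : List (Int × Int)) (d : PySem.Dict Int Int)
    (s : PySem.Set (Int × Int)) (h : d.keys.Nodup) :
    (es.foldl stepA (d, s)).1.keys.Nodup := by
  induction es generalizing d s with
  | nil => exact h
  | cons e es ih =>
    simp only [List.foldl_cons]
    unfold stepA
    split
    · apply ih
      exact PySem.Dict.nodup_keys_insert _ _ _ (PySem.Dict.nodup_keys_insert _ _ _ h)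
    · exact ih d s h

theorem ofList_items {κ ν : Type} [BEq κ] [LawfulBEq κ] (L : List (κ × ν))
    (h : (L.map Prod.fst).Nodup) : (PySem.Dict.ofList L).items = L := by
  have := PySem.Dict.items_foldl_insert_fresh L Prod.fst Prod.snd PySem.Dict.empty
    (fun a _ => PySem.Dict.contains_empty _) h
  simpa using this

theorem groupStep_eq : groupStep = fun g kv => g.modify kv.2 [] (fun l => l ++ [kv.1]) := by
  funext g kv
  unfold groupStep
  by_cases hc : g.contains kv.2 = true
  · simp [hc]
  · have hc' : g.contains kv.2 = false := Bool.eq_false_iff.mpr hc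
    simp only [hc', Bool.false_eq_true, if_false]
    unfold PySem.Dict.modify
    rw [PySem.Dict.getD_of_not_contains _ _ hc']
    simp

theorem G_keys (S : List (Int × Int)) :
    ((S.foldl groupStep PySem.Dict.empty)).keys = PySem.Set.ofList (S.map (fun p => p.2)) := by
  rw [groupStep_eq]
  rw [PySem.Dict.keys_foldl_modify_key S (fun p => p.2) [] (fun _ p => fun l => l ++ [p.1]) PySem.Dict.empty]
  rw [PySem.Dict.keys_empty, PySem.Set.update_nil_left]

theorem G_nodup (S : List (Int × Int)) :
    ((S.foldl groupStep PySem.Dict.empty)).keys.Nodup := by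
  rw [groupStep_eq]
  exact PySem.Dict.nodup_keys_foldl_modify_key S (fun p => p.2) [] _ _ PySem.Dict.nodup_keys_empty

theorem G_getD (S : List (Int × Int)) (c : Int) :
    ((S.foldl groupStep PySem.Dict.empty)).getD c []
      = (S.filter (fun p => p.2 == c)).map (fun p => p.1) := by
  rw [groupStep_eq]
  have hmap : S.foldl (fun g (kv : Int × Int) => g.modify kv.2 [] (fun l => l ++ [kv.1])) PySem.Dict.empty
      = (S.map (fun p => (p.2, p.1))).foldl (fun d (p : Int × Int) => d.modify p.1 [] (fun l => l ++ [p.2])) PySem.Dict.empty := by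
    rw [List.foldl_map]
  rw [hmap, PySem.Dict.getD_foldl_modify_append]
  simp [List.filter_map, Function.comp_def]

theorem G_items (S : List (Int × Int)) :
    ((S.foldl groupStep PySem.Dict.empty)).items
      = (PySem.Set.ofList (S.map (fun p => p.2))).map
          (fun k => (k, (S.filter (fun p => p.2 == k)).map (fun p => p.1))) := by
  rw [PySem.Dict.items_eq_map_keys _ (G_nodup S) []]
  rw [G_keys]
  exact List.map_congr_left (fun k _ => by rw [G_getD])
def lexLt (a b : Int × Int) : Bool :=
  decide (a.1 < b.1) || (!decide (b.1 < a.1) && decide (a.2 < b.2))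

def lexLe (a b : Int × Int) : Prop := a.1 < b.1 ∨ (a.1 = b.1 ∧ a.2 ≤ b.2)

theorem sorted2_eq_foldl (xs : List (Int × Int)) :
    PySem.List.sorted2 xs (fun p => p.1) (fun p => p.2)
      = xs.foldl (fun acc x => PySem.List.insertBy lexLt x acc) [] := rfl

theorem lexLt_true (a b : Int × Int) (h : lexLt a b = true) : lexLe a b := by
  unfold lexLt at h; unfold lexLe
  simp only [Bool.or_eq_true, Bool.and_eq_true, Bool.not_eq_true', decide_eq_true_eq, decide_eq_false_iff_not] at h
  omega

theorem lexLt_false (a b : Int × Int) (h : lexLt a b = false) : lexLe b a := by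
  unfold lexLt at h; unfold lexLe
  simp only [Bool.or_eq_false_iff, Bool.and_eq_false_iff, Bool.not_eq_false', decide_eq_false_iff_not, decide_eq_true_eq] at h
  omega

theorem lexLe_trans (a b c : Int × Int) (h1 : lexLe a b) (h2 : lexLe b c) : lexLe a c := by
  unfold lexLe at *; omega

theorem insertBy_lex_pairwise (x : Int × Int) (ys : List (Int × Int))
    (h : ys.Pairwise lexLe) : (PySem.List.insertBy lexLt x ys).Pairwise lexLe := by
  induction ys with
  | nil => simp [PySem.List.insertBy]
  | cons y ys ih =>
    rw [PySem.List.insertBy]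
    rcases List.pairwise_cons.mp h with ⟨hy, hys⟩
    by_cases hb : lexLt x y = true
    · simp only [hb, if_true]
      refine List.pairwise_cons.mpr ⟨?_, h⟩
      intro z hz
      rcases List.mem_cons.mp hz with rfl | hz
      · exact lexLt_true _ _ hb
      · exact lexLe_trans _ _ _ (lexLt_true _ _ hb) (hy z hz)
    · simp only [hb]
      refine List.pairwise_cons.mpr ⟨?_, ih hys⟩
      intro z hz
      rcases (PySem.List.insertBy_mem_iff _ _ _ _).mp hz with rfl | hz
      · exact lexLt_false _ _ (Bool.eq_false_iff.mpr hb)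
      · exact hy z hz

theorem foldl_insertBy_lex_pairwise (L acc : List (Int × Int))
    (h : acc.Pairwise lexLe) :
    (L.foldl (fun acc x => PySem.List.insertBy lexLt x acc) acc).Pairwise lexLe := by
  induction L generalizing acc with
  | nil => exact h
  | cons x L ih => exact ih _ (insertBy_lex_pairwise x acc h)
theorem pairwise_fst_lt_of_nodup {L : List (Int × Int)}
    (hle : L.Pairwise lexLe) (hnd : (L.map Prod.fst).Nodup) :
    L.Pairwise (fun a b => a.1 < b.1) := by
  have hne : L.Pairwise (fun a b : Int × Int => a.1 ≠ b.1) :=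
    (List.pairwise_map.mp hnd)
  exact (hle.and hne).imp (by intro a b h; rcases h with ⟨h1, h2⟩; unfold lexLe at h1; omega)

theorem eq_of_perm_of_pairwise_fst_lt {L1 L2 : List (Int × Int)}
    (hp : L1.Perm L2) (h1 : L1.Pairwise (fun a b => a.1 < b.1))
    (h2 : L2.Pairwise (fun a b => a.1 < b.1)) : L1 = L2 := by
  exact List.Perm.eq_of_pairwise (fun a b _ _ ha hb => by exfalso; omega) h1 h2 hp

theorem sorted2_eq_sorted_fst (L : List (Int × Int)) (h : (L.map Prod.fst).Nodup) :
    PySem.List.sorted2 L (fun p => p.1) (fun p => p.2)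
      = PySem.List.sorted L (fun p => p.1) := by
  have hperm : (PySem.List.sorted2 L (fun p => p.1) (fun p => p.2)).Perm L :=
    PySem.List.sorted2_perm L _ _ _
  have hperm2 : (PySem.List.sorted L (fun p => p.1)).Perm L :=
    PySem.List.sorted_perm L _ _
  have hnd1 : ((PySem.List.sorted2 L (fun p => p.1) (fun p => p.2)).map Prod.fst).Nodup :=
    ((hperm.map Prod.fst).nodup_iff).mpr h
  have hnd2 : ((PySem.List.sorted L (fun p => p.1)).map Prod.fst).Nodup :=
    ((hperm2.map Prod.fst).nodup_iff).mpr h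
  apply eq_of_perm_of_pairwise_fst_lt (hperm.trans hperm2.symm)
  · exact pairwise_fst_lt_of_nodup (by rw [sorted2_eq_foldl]; exact foldl_insertBy_lex_pairwise L [] (by simp)) hnd1
  · have hle : (PySem.List.sorted L (fun p => p.1)).Pairwise (fun a b : Int × Int => a.1 ≤ b.1) :=
      PySem.List.sorted_pairwise L (fun p => p.1)
    have hne : (PySem.List.sorted L (fun p => p.1)).Pairwise (fun a b : Int × Int => a.1 ≠ b.1) :=
      List.pairwise_map.mp hnd2
    exact (hle.and hne).imp (by intro a b hh; omega)

theorem phase2_eq (d : PySem.Dict Int Int) (hn : d.keys.Nodup) :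
    (PySem.Dict.ofList (PySem.List.sorted
        ((PySem.List.sorted2
            (PySem.Dict.ofList (PySem.List.sorted d.items (fun p => p.2) true)).items
            (fun p => p.1) (fun p => p.2)).foldl groupStep PySem.Dict.empty).items
        (fun p => p.1) true)).items
    = (PySem.List.sorted (PySem.Set.ofList d.values) (fun x => x) true).map
        (fun k => (k, PySem.List.sorted ((d.items.filter (fun p => p.2 == k)).map (fun p => p.1))
                        (fun x => x) false)) := by
  have hIfst : (d.items.map Prod.fst).Nodup := hn
  -- L1 = sorted(items, key=snd, reverse=True)
  set L1 := PySem.List.sorted d.items (fun p => p.2) true with hL1def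
  have hL1 : L1.Perm d.items := PySem.List.sorted_perm _ _ _
  have hL1fst : (L1.map Prod.fst).Nodup := ((hL1.map Prod.fst).nodup_iff).mpr hIfst
  rw [ofList_items L1 hL1fst]
  -- sorted2 collapses to S = sorted(items, key=fst)
  set S := PySem.List.sorted d.items (fun p => p.1) with hSdef
  have hSperm : S.Perm d.items := PySem.List.sorted_perm _ _ _
  have hSfst : (S.map Prod.fst).Nodup := ((hSperm.map Prod.fst).nodup_iff).mpr hIfst
  have hSpair : S.Pairwise (fun a b => a.1 < b.1) := by
    have hle : S.Pairwise (fun a b : Int × Int => a.1 ≤ b.1) :=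
      PySem.List.sorted_pairwise d.items (fun p => p.1)
    have hne : S.Pairwise (fun a b : Int × Int => a.1 ≠ b.1) := List.pairwise_map.mp hSfst
    exact (hle.and hne).imp (by intro a b hh; omega)
  have hs2 : PySem.List.sorted2 L1 (fun p => p.1) (fun p => p.2) = S := by
    rw [sorted2_eq_sorted_fst L1 hL1fst]
    exact PySem.List.sorted_eq_of_perm_of_pairwise_lt L1 S (fun p => p.1)
      (hSperm.trans hL1.symm) hSpair
  rw [hs2, G_items S]
  -- keys of the grouped dict vs sorted distinct degrees
  set K := PySem.Set.ofList (S.map (fun p => p.2)) with hKdef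
  set K' := PySem.List.sorted (PySem.Set.ofList d.values) (fun x => x) true with hK'def
  have hKnd : K.Nodup := PySem.Set.nodup_ofList _
  have hK'perm0 : K'.Perm (PySem.Set.ofList d.values) := PySem.List.sorted_perm _ _ _
  have hK'nd : K'.Nodup := (hK'perm0.nodup_iff).mpr (PySem.Set.nodup_ofList _)
  have hKK' : K'.Perm K := by
    refine (List.perm_ext_iff_of_nodup hK'nd hKnd).mpr ?_
    intro a
    rw [hK'perm0.mem_iff, PySem.Set.mem_ofList, PySem.Set.mem_ofList]
    show a ∈ d.items.map (fun x => x.2) ↔ a ∈ S.map (fun p => p.2)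
    exact ⟨fun hx => (hSperm.map (fun p => p.2)).symm.subset hx,
           fun hx => (hSperm.map (fun p => p.2)).subset hx⟩
  have hK'gt : K'.Pairwise (fun a b : Int => b < a) := by
    have hge : K'.Pairwise (fun a b : Int => b ≤ a) :=
      PySem.List.sorted_pairwise_rev _ (fun x => x)
    have hne : K'.Pairwise (fun a b : Int => a ≠ b) := hK'nd
    exact (hge.and hne).imp (by intro a b hh; omega)
  -- per-degree groups agree
  have hgroup : ∀ k : Int,
      PySem.List.sorted ((d.items.filter (fun p => p.2 == k)).map (fun p => p.1)) (fun x => x) false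
        = (S.filter (fun p => p.2 == k)).map (fun p => p.1) := by
    intro k
    apply PySem.List.sorted_eq_of_perm_of_pairwise_lt
    · exact (hSperm.filter _).map _
    · have := (hSpair.filter (fun p => p.2 == k))
      exact List.pairwise_map.mpr this
  -- final: sorted by fst, reverse=True, of the grouped items equals B's list
  set f : Int → Int × List Int := fun k => (k, (S.filter (fun p => p.2 == k)).map (fun p => p.1)) with hfdef
  have hfinal : PySem.List.sorted (K.map f) (fun p => p.1) true = K'.map f := by
    apply PySem.List.sorted_rev_eq_of_perm_of_pairwise_gt
    · exact hKK'.map f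
    · exact List.pairwise_map.mpr (hK'gt.imp (by intro a b hh; simpa [hfdef] using hh))
  rw [hfinal] at *
  rw [ofList_items]
  · exact (List.map_congr_left (fun k _ => by rw [hfdef, hgroup k])).symm
  · have : (K'.map f).map Prod.fst = K' := by
      simp [hfdef, List.map_map, Function.comp_def]
    rw [this]; exact hK'nd

-- ===== VERDICT (by name: the statement is the Claim_ definition above) =====
theorem calculate_degree_spec : Claim_equal_calculate_degree := by
  intro edges nodes _ _
  unfold Spec_calculate_degree calculate_degree calculate_degree_alt
  have h1 : (edges.foldl stepA (degInit nodes, PySem.Set.empty)).1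
      = (edges.foldl stepB (degInit nodes, PySem.Set.empty)).1 :=
    phase1_eq edges _ _ _ (by intro p; simp [PySem.Set.empty, canon])
  have hn : (edges.foldl stepA (degInit nodes, PySem.Set.empty)).1.keys.Nodup := by
    apply phase1_nodup
    exact PySem.Dict.nodup_keys_foldl_insert nodes (fun _ _ => 0) PySem.Dict.empty
      PySem.Dict.nodup_keys_empty
  rw [← h1]
  exact phase2_eq _ hn
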